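-- pv_equiv track=rewrite | github.com/mldc3/band-completion-and-lorentzian-fitting-with-and-without-topological-gaps- | band_analysis_with_topological_gaps.py | sort_subbands
-- ===== SOURCE A (Python) =====
-- def sort_subbands(band):
--     band_sorted = []
--     for subband in band:
--         sorted_vals = sorted([x for x in subband if x is not None])
--         n_nones = subband.count(None)
--         subband_sorted = sorted_vals + [None] * n_nones
--         band_sorted.append(subband_sorted)
--     return band_sorted
-- ===== SOURCE B (Python) =====
-- def sort_subbands(band):
--     return [sorted(subband, key=lambda x: (x is None, 0 if x is None else x))
--             for subband in band]
-- ===== Notes on version B (the rewrite author's own statement) =====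
-- stated objective: idiomatic
-- what changed: Replaces the filter + count(None) + concatenation per subband with a single stable sort of the whole subband under the key (x is None, value), which pushes Nones to the end in one pass over each subband.
import Mathlib
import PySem

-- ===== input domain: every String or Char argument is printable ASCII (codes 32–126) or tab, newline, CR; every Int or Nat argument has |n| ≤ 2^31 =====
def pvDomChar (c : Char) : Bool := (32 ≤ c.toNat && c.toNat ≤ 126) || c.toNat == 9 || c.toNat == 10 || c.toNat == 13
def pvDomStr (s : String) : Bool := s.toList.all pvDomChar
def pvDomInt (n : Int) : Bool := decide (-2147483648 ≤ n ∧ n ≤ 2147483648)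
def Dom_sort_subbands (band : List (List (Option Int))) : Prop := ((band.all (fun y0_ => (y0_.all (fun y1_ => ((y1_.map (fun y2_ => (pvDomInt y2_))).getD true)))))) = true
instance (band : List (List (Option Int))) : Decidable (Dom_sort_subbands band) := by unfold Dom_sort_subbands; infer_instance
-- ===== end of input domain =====

-- B replaces A's per-subband filter + None-count + concatenation with one stable
-- sort under the key (x is None, value); same result, more idiomatic.


-- ===== PORT A =====
-- A: for each subband, sort the non-None values, count the Nones, concatenate.
def sort_subbands (band : List (List (Option Int))) : List (List (Option Int)) :=
  band.foldl (fun band_sorted subband =>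
    let sorted_vals := PySem.List.sorted (subband.filterMap (fun x => x)) (fun x => x) false
    let n_nones := PySem.List.count subband (none : Option Int)
    let subband_sorted := sorted_vals.map some ++ List.replicate n_nones (none : Option Int)
    band_sorted ++ [subband_sorted]) []

-- ===== PORT B =====
-- B: one stable sort per subband with key (x is None, 0 if x is None else x).
def sort_subbands_alt (band : List (List (Option Int))) : List (List (Option Int)) :=
  band.map (fun subband =>
    PySem.List.sorted2 subband (fun x => x.isNone) (fun x => x.getD 0) false)

-- ===== PRECONDITION & SPEC =====
def Spec_sort_subbands (band : List (List (Option Int))) (out : List (List (Option Int))) : Prop := out = sort_subbands_alt band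
instance (band : List (List (Option Int))) (out : List (List (Option Int))) : Decidable (Spec_sort_subbands band out) := by unfold Spec_sort_subbands; infer_instance

-- ===== CLAIM (what is proved, stated in full; the proofs are below) =====
def Claim_equal_sort_subbands : Prop := ∀ (band : List (List (Option Int))), Dom_sort_subbands band → Spec_sort_subbands band (sort_subbands band)

-- ===== LEMMAS AND PROOFS =====

-- B's comparison function (the insertion ordering sorted2 uses for B's key)
def pvBefore (a b : Option Int) : Bool :=
  decide (a.isNone < b.isNone) || (!decide (b.isNone < a.isNone) && decide (a.getD 0 < b.getD 0))

theorem pvBefore_none (y : Option Int) : pvBefore none y = false := by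
  cases y <;> simp [pvBefore]

theorem pvBefore_some_none (v : Int) : pvBefore (some v) none = true := by
  simp [pvBefore]

theorem pvBefore_some_some (v w : Int) : pvBefore (some v) (some w) = decide (v < w) := by
  simp [pvBefore]

-- inserting None into (values ++ Nones) appends it at the end
theorem insert_none (acc : List (Option Int)) :
    PySem.List.insertBy pvBefore none acc = acc ++ [none] := by
  apply PySem.List.insertBy_of_forall_not_before
  intro y _
  exact pvBefore_none y

-- inserting a value into (sorted values ++ Nones) inserts it among the values
theorem insert_some (v : Int) (s : List Int) (n : Nat) :
    PySem.List.insertBy pvBefore (some v) (s.map some ++ List.replicate n (none : Option Int))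
      = (PySem.List.insertBy (fun a b => decide (a < b)) v s).map some
          ++ List.replicate n (none : Option Int) := by
  induction s with
  | nil =>
      cases n with
      | zero => simp [PySem.List.insertBy]
      | succ m => simp [PySem.List.insertBy, List.replicate_succ, pvBefore_some_none]
  | cons w s ih =>
      by_cases h : v < w
      · simp [PySem.List.insertBy, pvBefore_some_some, h]
      · simp [PySem.List.insertBy, pvBefore_some_some, h, ih]

-- per-subband equality: B's single sort equals A's filter-sort-concat
theorem subband_eq (sb : List (Option Int)) :
    PySem.List.sorted2 sb (fun x => x.isNone) (fun x => x.getD 0) false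
      = (PySem.List.sorted (sb.filterMap (fun x => x)) (fun x => x) false).map some
          ++ List.replicate (PySem.List.count sb (none : Option Int)) (none : Option Int) := by
  induction sb using List.reverseRecOn with
  | nil => rfl
  | append_singleton sb x ih =>
      have hB : PySem.List.sorted2 (sb ++ [x]) (fun x => x.isNone) (fun x => x.getD 0) false
          = PySem.List.insertBy pvBefore x
              (PySem.List.sorted2 sb (fun x => x.isNone) (fun x => x.getD 0) false) := by
        simp only [PySem.List.sorted2, List.foldl_append]
        rfl
      cases x with
      | none =>
          rw [hB, ih, insert_none]
          simp [PySem.List.count, List.count_append, List.replicate_add,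
            List.append_assoc]
      | some v =>
          have hA : PySem.List.sorted ((sb ++ [some v]).filterMap (fun x => x)) (fun x => x) false
              = PySem.List.insertBy (fun a b : Int => decide (a < b)) v
                  (PySem.List.sorted (sb.filterMap (fun x => x)) (fun x => x) false) := by
            simp [PySem.List.sorted, List.filterMap_append, List.foldl_append]
          rw [hB, ih, insert_some, hA]
          simp [PySem.List.count, List.count_append]

-- ===== VERDICT (by name: the statement is the Claim_ definition above) =====
theorem sort_subbands_spec : Claim_equal_sort_subbands := by
  intro band _
  unfold Spec_sort_subbands sort_subbands sort_subbands_alt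
  rw [PySem.List.foldl_append_singleton_eq_map]
  exact List.map_congr_left (fun sb _ => (subband_eq sb).symm)
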